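-- pv_equiv track=rewrite | github.com/NENUBioCompute/TMPBindingDomain | utils/PDB/Utilities/MultiProcess/PDBParser/pdbDealer.py | list2dict_SPLIT
-- ===== SOURCE A (Python) =====
-- def list2dict_SPLIT(list):
--     part_dict = {}
--     count = 0
--     flag = 0
--     for row in list:
--         if row[0] == 'SPLIT':
--             count += 1
--             length = len(row)
--             if count == 1:
--                 flag = 1
--             part_dict['IDcode'] = []
--             for i in range(1 + flag,length):
--                 part_dict['IDcode'].append(row[i])
--
--     return part_dict
-- ===== SOURCE B (Python) =====
-- def list2dict_SPLIT(list):
--     for row in reversed(list):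
--         if row[0] == 'SPLIT':
--             return {'IDcode': row[2:]}
--     return {}
-- ===== Notes on version B (the rewrite author's own statement) =====
-- stated objective: simpler
-- what changed: Only the last SPLIT row matters, so B scans the list in reverse and returns {'IDcode': row[2:]} at the first SPLIT row found, instead of A's forward pass that rebuilds and overwrites the entry (with a flag/count state machine) at every SPLIT row.
import Mathlib
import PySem

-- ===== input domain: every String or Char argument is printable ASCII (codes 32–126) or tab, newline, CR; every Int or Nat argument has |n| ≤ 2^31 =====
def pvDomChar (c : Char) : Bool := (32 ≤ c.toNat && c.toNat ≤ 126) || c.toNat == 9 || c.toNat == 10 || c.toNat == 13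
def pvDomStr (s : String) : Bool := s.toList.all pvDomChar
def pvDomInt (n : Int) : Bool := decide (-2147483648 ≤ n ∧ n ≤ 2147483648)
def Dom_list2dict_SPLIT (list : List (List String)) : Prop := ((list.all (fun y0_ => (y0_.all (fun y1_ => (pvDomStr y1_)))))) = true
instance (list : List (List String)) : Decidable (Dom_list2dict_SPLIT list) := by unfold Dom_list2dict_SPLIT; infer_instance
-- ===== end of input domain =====

-- B replaces A's forward pass (which overwrites part_dict['IDcode'] at every SPLIT row, with a count/flag state machine)
-- by a single early-terminating reverse scan that builds the result once from the last SPLIT row; objective: simpler.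

-- ===== PORT A =====
-- the loop body of A's 'for row in list', state = (part_dict, count, flag)
def aStep (st : PySem.Dict String (List String) × Int × Int) (row : List String) :
    PySem.Dict String (List String) × Int × Int :=
  -- row[0]: on an empty row Python raises IndexError (pyGet? = none); such inputs are excluded by Pre_
  if PySem.List.pyGet? row 0 = some "SPLIT" then
    let count := st.2.1 + 1
    let length : Int := (row.length : Int)
    let flag : Int := if count = 1 then 1 else st.2.2
    let d := st.1.insert "IDcode" []
    -- part_dict['IDcode'].append(row[i]): the key was just set and i ∈ range(1+flag, length)
    -- is always a valid index, so Dict.modify with default [] and pyGetD with default "" are exact here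
    let d := (PySem.List.pyRange (1 + flag) length 1).foldl
      (fun d i => d.modify "IDcode" [] (fun s => s ++ [PySem.List.pyGetD row i ""])) d
    (d, count, flag)
  else st

def list2dict_SPLIT (list : List (List String)) : List (String × List String) :=
  (list.foldl aStep (PySem.Dict.empty, 0, 0)).1.items

-- ===== PORT B =====
-- 'for row in reversed(list): if row[0] == 'SPLIT': return {'IDcode': row[2:]}' / 'return {}'
def altGo : List (List String) → List (String × List String)
  | [] => []
  | row :: rest =>
    if PySem.List.pyGet? row 0 = some "SPLIT" then
      [("IDcode", PySem.List.slice row (some 2) none)]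
    else altGo rest

def list2dict_SPLIT_alt (list : List (List String)) : List (String × List String) :=
  altGo list.reverse

-- ===== PRECONDITION & SPEC =====
-- Pre_ excludes exactly the inputs containing an empty row, on which Python A raises IndexError at row[0]
def Pre_list2dict_SPLIT (list : List (List String)) : Prop := ∀ row ∈ list, row ≠ []
instance (list : List (List String)) : Decidable (Pre_list2dict_SPLIT list) := by
  unfold Pre_list2dict_SPLIT; infer_instance

def pvWitness_list2dict_SPLIT : List (List String) := [["SPLIT", "1ab", "2cd"], ["x"]]

def Spec_list2dict_SPLIT (list : List (List String)) (out : List (String × List String)) : Prop :=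
  out = list2dict_SPLIT_alt list
instance (list : List (List String)) (out : List (String × List String)) :
    Decidable (Spec_list2dict_SPLIT list out) := by unfold Spec_list2dict_SPLIT; infer_instance

-- ===== CLAIM (what is proved, stated in full; the proofs are below) =====
def Claim_equal_list2dict_SPLIT : Prop := ∀ (list : List (List String)),
  Dom_list2dict_SPLIT list → Pre_list2dict_SPLIT list →
  Spec_list2dict_SPLIT list (list2dict_SPLIT list)

-- ===== LEMMAS AND PROOFS =====

-- the invariant A's state keeps: the dict is still {} (count 0, flag 0) or holds exactly key 'IDcode' with flag 1
def AInv (st : PySem.Dict String (List String) × Int × Int) : Prop :=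
  st = (PySem.Dict.empty, 0, 0) ∨ ∃ v c, st = (PySem.Dict.mk [("IDcode", v)], c, 1)

lemma foldlApp (l : List String) (acc : List String) :
    l.foldl (fun d x => PySem.Dict.modify d "IDcode" [] (fun s => s ++ [x]))
      (PySem.Dict.mk [("IDcode", acc)]) = PySem.Dict.mk [("IDcode", acc ++ l)] := by
  induction l generalizing acc with
  | nil => simp
  | cons x t ih =>
    simp only [List.foldl_cons]
    have h : PySem.Dict.modify (PySem.Dict.mk [("IDcode", acc)]) "IDcode" [] (fun s => s ++ [x])
        = PySem.Dict.mk [("IDcode", acc ++ [x])] := by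
      simp [PySem.Dict.modify, PySem.Dict.getD, PySem.Dict.get?, PySem.Dict.insert, PySem.Dict.contains]
    rw [h, ih]; simp

lemma aStep_split (st : PySem.Dict String (List String) × Int × Int) (row : List String)
    (hinv : AInv st) (h : PySem.List.pyGet? row 0 = some "SPLIT") :
    aStep st row = (PySem.Dict.mk [("IDcode", row.drop 2)], st.2.1 + 1, 1) := by
  have hflag : (if st.2.1 + 1 = (1:Int) then (1:Int) else st.2.2) = 1 := by
    rcases hinv with h0 | ⟨v, c, h1⟩
    · rw [h0]; norm_num
    · rw [h1]; split <;> rfl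
  have hins : st.1.insert "IDcode" [] = PySem.Dict.mk [("IDcode", [])] := by
    rcases hinv with h0 | ⟨v, c, h1⟩
    · rw [h0]; rfl
    · rw [h1]; simp [PySem.Dict.insert, PySem.Dict.contains]
  simp only [aStep, h, hflag, hins]
  have hfold := PySem.List.foldl_pyRange_pyGetD' (xs := row) (d := "")
    (f := fun d x => PySem.Dict.modify d "IDcode" [] (fun s => s ++ [x]))
    (init := PySem.Dict.mk [("IDcode", ([] : List String))]) (a := 2) (by norm_num)
  norm_num at hfold ⊢
  rw [hfold, foldlApp]
  simp

lemma altGo_append (xs ys : List (List String)) :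
    altGo (xs ++ ys) = if altGo xs = [] then altGo ys else altGo xs := by
  induction xs with
  | nil => simp [altGo]
  | cons row t ih =>
    by_cases h : PySem.List.pyGet? row 0 = some "SPLIT"
    · simp [altGo, h]
    · simp [altGo, h, ih]

lemma main_lemma (l : List (List String)) (st : PySem.Dict String (List String) × Int × Int)
    (hinv : AInv st) :
    (l.foldl aStep st).1.items
      = if altGo l.reverse = [] then st.1.items else altGo l.reverse := by
  induction l generalizing st with
  | nil => simp [altGo]
  | cons row rest ih =>
    simp only [List.foldl_cons, List.reverse_cons, altGo_append]
    by_cases h : PySem.List.pyGet? row 0 = some "SPLIT"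
    · rw [aStep_split st row hinv h]
      rw [ih _ (Or.inr ⟨row.drop 2, st.2.1 + 1, rfl⟩)]
      have hrow : altGo [row] = [("IDcode", row.drop 2)] := by
        simp [altGo, h, PySem.List.slice_from (xs := row) (a := 2) (by norm_num)]
      by_cases hr : altGo rest.reverse = [] <;> simp [hr, hrow]
    · have hstep : aStep st row = st := by simp [aStep, h]
      have hrow : altGo [row] = [] := by simp [altGo, h]
      rw [hstep, ih st hinv]
      by_cases hr : altGo rest.reverse = [] <;> simp [hr, hrow]

-- ===== VERDICT (by name: the statement is the Claim_ definition above) =====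
theorem list2dict_SPLIT_spec : Claim_equal_list2dict_SPLIT := by
  intro list _hdom _hpre
  unfold Spec_list2dict_SPLIT list2dict_SPLIT list2dict_SPLIT_alt
  rw [main_lemma list _ (Or.inl rfl)]
  by_cases hr : altGo list.reverse = [] <;> simp [hr, PySem.Dict.empty]
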